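-- pv_equiv track=rewrite | github.com/heikaishuizz/RC-NF | scripts/build_paper_body.py | strip_tex_comments
-- ===== SOURCE A (Python) =====
-- def strip_tex_comments(tex: str) -> str:
--     lines = []
--     for line in tex.splitlines():
--         if line.strip().startswith("%") and not line.strip().startswith("%\\"):
--             continue
--         if "%" in line and not line.strip().startswith("%"):
--             # keep escaped \%
--             idx = 0
--             while True:
--                 p = line.find("%", idx)
--                 if p == -1:
--                     break
--                 if p > 0 and line[p - 1] == "\\":
--                     idx = p + 1
--                     continue
--                 line = line[:p].rstrip()
--                 break
--         lines.append(line)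
--     return "\n".join(lines)
-- ===== SOURCE B (Python) =====
-- def _cut(line):
--     """Truncate at the first '%' not escaped by a preceding backslash.
--
--     Works on the pieces of line.split('%'): re-join pieces while the text so
--     far ends with a backslash (escaped '%'), otherwise cut there and rstrip.
--     """
--     parts = line.split('%')
--     out = parts[0]
--     for part in parts[1:]:
--         if not out.endswith('\\'):
--             return out.rstrip()
--         out += '%' + part
--     return out
--
--
-- def _clean(line):
--     """None for a pure-comment line to drop, else the line to keep."""
--     head = line.strip()
--     if head.startswith('%'):
--         return line if head.startswith('%\\') else None
--     return _cut(line)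
--
--
-- def strip_tex_comments(tex: str) -> str:
--     return '\n'.join(c for c in map(_clean, tex.splitlines()) if c is not None)
-- ===== Notes on version B (the rewrite author's own statement) =====
-- stated objective: alternative
-- what changed: The hand-rolled while/find index loop with in-place reslicing is replaced by splitting each line on '%' and re-joining the pieces while the accumulated text ends with a backslash (cutting where it does not), and the append-to-list outer loop becomes a per-line Optional-returning cleaner mapped over the lines and filtered.
import Mathlib
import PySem

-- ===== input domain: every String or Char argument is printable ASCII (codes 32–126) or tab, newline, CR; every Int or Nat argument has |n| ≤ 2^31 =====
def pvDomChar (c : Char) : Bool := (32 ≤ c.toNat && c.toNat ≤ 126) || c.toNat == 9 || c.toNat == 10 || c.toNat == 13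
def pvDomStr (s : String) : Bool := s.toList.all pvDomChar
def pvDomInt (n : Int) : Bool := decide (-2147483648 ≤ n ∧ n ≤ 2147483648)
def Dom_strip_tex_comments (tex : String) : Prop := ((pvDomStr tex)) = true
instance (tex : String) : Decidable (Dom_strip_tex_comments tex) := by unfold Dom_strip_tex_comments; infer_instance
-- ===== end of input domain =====

-- B replaces A's while/find index loop by splitting each line on '%' and re-joining the
-- pieces while the text so far ends with a backslash, and the append-accumulator outer
-- loop by an Optional-returning per-line cleaner mapped and filtered (objective:
-- alternative); return values agree everywhere.

-- ===== PORT A =====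
-- the 'while True' find loop of A; fuel = ln.length + 1 bounds its iterations (idx strictly grows)
def aScan (ln : List Char) (idx : Nat) (fuel : Nat) : List Char :=
  match fuel with
  | 0 => ln
  | f + 1 =>
    let p : Int := PySem.Chars.findFrom ln ['%'] (idx : Int)
    if p = -1 then ln
    else if 0 < p ∧ PySem.List.pyGet? ln (p - 1) = some '\\' then
      aScan ln (p.toNat + 1) f
    else
      PySem.Chars.rstrip (ln.take p.toNat)

def strip_tex_comments (tex : String) : String :=
  let lines := (PySem.Str.splitlines tex).foldl (fun acc ln =>
    let l := ln.toList
    let st := PySem.Chars.strip l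
    if PySem.Chars.startswith st ['%'] && !PySem.Chars.startswith st ['%', '\\'] then acc
    else
      let l2 := if PySem.Chars.isIn ['%'] l && !PySem.Chars.startswith st ['%'] then
          aScan l 0 (l.length + 1)
        else l
      acc ++ [l2]) []
  String.ofList (PySem.Chars.join ['\n'] lines)

-- ===== PORT B =====
-- _cut: walk the pieces of line.split('%'), re-joining while the text so far ends in '\'
def cutLoop (out : List Char) (parts : List (List Char)) : List Char :=
  match parts with
  | [] => out
  | p :: rest =>
    if !(PySem.Chars.endswith out ['\\']) then PySem.Chars.rstrip out
    else cutLoop (out ++ '%' :: p) rest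

def cutComment (l : List Char) : List Char :=
  match List.splitOn '%' l with
  | [] => l          -- unreachable: split('%') always yields at least one piece
  | p :: rest => cutLoop p rest

-- _clean: none for a pure-comment line to drop, else the line to keep
def bClean (ln : String) : Option (List Char) :=
  let head := PySem.Chars.strip ln.toList
  if PySem.Chars.startswith head ['%'] then
    if PySem.Chars.startswith head ['%', '\\'] then some ln.toList else none
  else some (cutComment ln.toList)

def strip_tex_comments_alt (tex : String) : String :=
  String.ofList (PySem.Chars.join ['\n'] (((PySem.Str.splitlines tex).map bClean).filterMap id))

-- ===== PRECONDITION & SPEC =====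
def Spec_strip_tex_comments (tex : String) (out : String) : Prop := out = strip_tex_comments_alt tex
instance (tex : String) (out : String) : Decidable (Spec_strip_tex_comments tex out) := by unfold Spec_strip_tex_comments; infer_instance

-- ===== CLAIM (what is proved, stated in full; the proofs are below) =====
def Claim_equal_strip_tex_comments : Prop := ∀ (tex : String), Dom_strip_tex_comments tex → Spec_strip_tex_comments tex (strip_tex_comments tex)

-- ===== LEMMAS AND PROOFS =====

-- 'position j of cs is an unescaped %', relative to the char preceding cs (prev)
def uP (cs : List Char) (prev : Option Char) (j : Nat) : Prop :=
  cs[j]? = some '%' ∧ (if j = 0 then prev ≠ some '\\' else cs[j-1]? ≠ some '\\')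

-- proof-side reference function: index of the first unescaped '%'
def bFind : List Char → Option Char → Option Nat
  | [], _ => none
  | c :: rest, prev =>
    if c = '%' ∧ prev ≠ some '\\' then some 0
    else (bFind rest (some c)).map (· + 1)

lemma uP_shift (c : Char) (rest : List Char) (prev : Option Char) (j : Nat) :
    uP (c :: rest) prev (j + 1) ↔ uP rest (some c) j := by
  cases j with
  | zero => simp [uP]
  | succ j => simp [uP]

lemma singleton_prefix_iff (a : Char) (l : List Char) : [a] <+: l ↔ l[0]? = some a := by
  cases l with
  | nil => simp
  | cons b t => simp [List.cons_prefix_cons, eq_comm]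

lemma bFind_none (cs : List Char) (prev : Option Char)
    (h : ∀ j, ¬ uP cs prev j) : bFind cs prev = none := by
  induction cs generalizing prev with
  | nil => rfl
  | cons c rest ih =>
    have h0 := h 0
    simp [uP] at h0
    rw [bFind, if_neg (by tauto), ih (some c) (fun j hj => (h (j + 1)) ((uP_shift c rest prev j).mpr hj))]
    rfl

lemma bFind_some (cs : List Char) (prev : Option Char) (k : Nat)
    (hk : uP cs prev k) (hmin : ∀ j < k, ¬ uP cs prev j) : bFind cs prev = some k := by
  induction cs generalizing prev k with
  | nil => simp [uP] at hk
  | cons c rest ih =>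
    cases k with
    | zero =>
      simp [uP] at hk
      rw [bFind, if_pos (by tauto)]
    | succ k =>
      have h0 := hmin 0 (Nat.succ_pos k)
      simp [uP] at h0
      rw [bFind, if_neg (by tauto),
        ih (some c) k ((uP_shift c rest prev k).mp hk)
          (fun j hj => fun hu => hmin (j + 1) (by omega) ((uP_shift c rest prev j).mpr hu))]
      rfl

-- ln[j]? = some '%' at a position ≥ idx puts '%' into ln.drop idx as a prefix of some tail
lemma prefix_drop_of_getElem (ln : List Char) (idx j : Nat) (hij : idx ≤ j)
    (h : ln[j]? = some '%') : ['%'] <+: List.drop (j - idx) (List.drop idx ln) := by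
  rw [singleton_prefix_iff, List.drop_drop, List.getElem?_drop]
  rw [show idx + (j - idx) + 0 = j by omega]
  exact h

lemma aScan_eq (ln : List Char) (fuel : Nat) : ∀ idx : Nat, idx ≤ ln.length →
    ln.length - idx < fuel →
    (∀ j < idx, ¬ uP ln none j) →
    aScan ln idx fuel = (match bFind ln none with
      | none => ln
      | some k => PySem.Chars.rstrip (ln.take k)) := by
  induction fuel with
  | zero => intro idx h1 h2 h3; omega
  | succ f ih =>
    intro idx h1 h2 h3
    rw [aScan]
    simp only [PySem.Chars.findFrom_natCast ln ['%'] idx h1]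
    by_cases hf : PySem.Chars.find (List.drop idx ln) ['%'] = -1
    · rw [if_pos hf]
      have hall : ∀ j, ¬ uP ln none j := by
        intro j hu
        by_cases hj : j < idx
        · exact h3 j hj hu
        · refine (PySem.Chars.find_eq_neg_one_iff (List.drop idx ln) ['%']).mp hf ?_
          exact (prefix_drop_of_getElem ln idx j (by omega) hu.1).isInfix.trans (List.drop_suffix _ _).isInfix
      rw [bFind_none ln none hall]
      simp
    · rw [if_neg hf]
      have hnn : 0 ≤ PySem.Chars.find (List.drop idx ln) ['%'] := by
        have := PySem.Chars.neg_one_le_find (List.drop idx ln) ['%']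
        omega
      obtain ⟨hpre, hmin⟩ := PySem.Chars.find_spec (s := List.drop idx ln) (sub := ['%']) hnn
      set f0 : Nat := (PySem.Chars.find (List.drop idx ln) ['%']).toNat with hf0
      have hp' : ln[idx + f0]? = some '%' := by
        rw [singleton_prefix_iff, List.drop_drop, List.getElem?_drop] at hpre
        simpa using hpre
      have hplt : idx + f0 < ln.length := by
        obtain ⟨h, -⟩ := List.getElem?_eq_some_iff.mp hp'
        exact h
      have hfe : (f0 : Int) = PySem.Chars.find (List.drop idx ln) ['%'] := by
        rw [hf0]; exact Int.toNat_of_nonneg hnn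
      have hcast : (idx : Int) + PySem.Chars.find (List.drop idx ln) ['%'] = ((idx + f0 : Nat) : Int) := by
        omega
      rw [hcast]
      have hne : ((idx + f0 : Nat) : Int) ≠ -1 := by omega
      rw [if_neg hne]
      -- no '%' strictly between idx and idx+f0
      have hnomid : ∀ j, idx ≤ j → j < idx + f0 → ln[j]? ≠ some '%' := by
        intro j hj1 hj2 hg
        exact hmin (j - idx) (by omega) (prefix_drop_of_getElem ln idx j hj1 hg)
      have hcond : (0 < ((idx + f0 : Nat) : Int) ∧
          PySem.List.pyGet? ln (((idx + f0 : Nat) : Int) - 1) = some '\\') ↔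
          (0 < idx + f0 ∧ ln[idx + f0 - 1]? = some '\\') := by
        by_cases h0 : idx + f0 = 0
        · simp [h0]
        · have hc1 : ((idx + f0 : Nat) : Int) - 1 = ((idx + f0 - 1 : Nat) : Int) := by omega
          rw [hc1, PySem.List.pyGet?_natCast]
          constructor
          · rintro ⟨ha, hb⟩; exact ⟨by omega, hb⟩
          · rintro ⟨ha, hb⟩; exact ⟨by omega, hb⟩
      by_cases hesc : 0 < idx + f0 ∧ ln[idx + f0 - 1]? = some '\\'
      · rw [if_pos (hcond.mpr hesc)]
        have htn : ((idx + f0 : Nat) : Int).toNat = idx + f0 := by omega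
        rw [htn]
        refine ih (idx + f0 + 1) (by omega) (by omega) ?_
        intro j hj hu
        by_cases hj1 : j < idx
        · exact h3 j hj1 hu
        · by_cases hj2 : j < idx + f0
          · exact hnomid j (by omega) hj2 hu.1
          · have hje : j = idx + f0 := by omega
            have h2' := hu.2
            rw [hje, if_neg (by omega : ¬ (idx + f0 = 0))] at h2'
            exact h2' hesc.2
      · rw [if_neg (fun hc => hesc (hcond.mp hc))]
        have hbf : bFind ln none = some (idx + f0) := by
          refine bFind_some ln none (idx + f0) ⟨hp', ?_⟩ ?_
          · by_cases h0 : idx + f0 = 0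
            · simp [h0]
            · rw [if_neg h0]
              intro hb
              exact hesc ⟨by omega, hb⟩
          · intro j hj hu
            by_cases hj1 : j < idx
            · exact h3 j hj1 hu
            · exact hnomid j (by omega) hj hu.1
        rw [hbf]
        have htn : ((idx + f0 : Nat) : Int).toNat = idx + f0 := by omega
        rw [htn]

-- ending in a backslash, as seen by uP
lemma endswith_bslash_iff (out : List Char) :
    PySem.Chars.endswith out ['\\'] = true ↔ out[out.length - 1]? = some '\\' := by
  rw [PySem.Chars.endswith_iff, ← List.getLast?_eq_getElem?]
  constructor
  · rintro ⟨t, rfl⟩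
    simp
  · intro h
    obtain ⟨t, rfl⟩ := (List.getLast?_eq_some_iff).mp h
    exact ⟨t, rfl⟩

-- uP of an extended list, below the extension point
lemma uP_append_lt (out x : List Char) (j : Nat) (hj : j < out.length) :
    uP (out ++ x) none j ↔ uP out none j := by
  unfold uP
  rw [List.getElem?_append_left hj, List.getElem?_append_left (by omega : j - 1 < out.length)]

lemma noUnesc_of_not_mem (l : List Char) (h : '%' ∉ l) : ∀ j, ¬ uP l none j := by
  intro j hu
  exact h (List.mem_of_getElem? hu.1)

lemma cutLoop_eq (parts : List (List Char)) : ∀ out : List Char,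
    (∀ j, ¬ uP out none j) → (∀ q ∈ parts, '%' ∉ q) →
    cutLoop out parts = (match bFind (out ++ parts.flatMap (fun q => '%' :: q)) none with
      | none => out ++ parts.flatMap (fun q => '%' :: q)
      | some k => PySem.Chars.rstrip ((out ++ parts.flatMap (fun q => '%' :: q)).take k)) := by
  induction parts with
  | nil =>
    intro out h1 _
    simp only [List.flatMap_nil, List.append_nil, cutLoop]
    rw [bFind_none out none h1]
  | cons p rest ih =>
    intro out h1 h2
    rw [cutLoop]
    have hflat : (p :: rest).flatMap (fun q => '%' :: q) = ('%' :: p) ++ rest.flatMap (fun q => '%' :: q) := by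
      simp
    by_cases he : PySem.Chars.endswith out ['\\'] = true
    · rw [if_neg (by simp [he])]
      have h1' : ∀ j, ¬ uP (out ++ '%' :: p) none j := by
        intro j hu
        by_cases hj1 : j < out.length
        · exact h1 j ((uP_append_lt out ('%' :: p) j hj1).mp hu)
        · by_cases hj2 : j = out.length
          · have hprev := hu.2
            have hpos : ¬ j = 0 := by
              intro h0
              rw [h0] at hj2
              have : out = [] := by
                cases out with
                | nil => rfl
                | cons a t => simp at hj2
              rw [this] at he
              simp [PySem.Chars.endswith, List.isSuffixOf] at he
            rw [if_neg hpos] at hprev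
            apply hprev
            rw [hj2, List.getElem?_append_left (by omega : out.length - 1 < out.length)]
            exact (endswith_bslash_iff out).mp he
          · have hc := hu.1
            have hjlt : j < (out ++ '%' :: p).length := (List.getElem?_eq_some_iff.mp hc).1
            simp only [List.length_append, List.length_cons] at hjlt
            have hjp : j - out.length - 1 < p.length := by omega
            rw [List.getElem?_append_right (by omega), List.getElem?_cons] at hc
            rw [if_neg (by omega : ¬ j - out.length = 0)] at hc
            exact h2 p (by simp) (by
              have := List.mem_of_getElem? hc
              exact this)
      rw [ih (out ++ '%' :: p) h1' (fun q hq => h2 q (by simp [hq])), hflat,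
        ← List.append_assoc]
    · have he' : PySem.Chars.endswith out ['\\'] = false := by
        cases hb : PySem.Chars.endswith out ['\\'] with
        | false => rfl
        | true => exact absurd hb he
      have hflat' : (p :: rest).flatMap (fun q => '%' :: q) = '%' :: (p ++ rest.flatMap (fun q => '%' :: q)) := by
        simp
      rw [if_pos (by simp [he']), hflat']
      have hbf : bFind (out ++ '%' :: (p ++ rest.flatMap (fun q => '%' :: q))) none = some out.length := by
        refine bFind_some _ none out.length ⟨?_, ?_⟩ ?_
        · rw [List.getElem?_append_right (le_refl _)]
          simp
        · by_cases h0 : out.length = 0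
          · rw [if_pos h0]
            simp
          · rw [if_neg h0, List.getElem?_append_left (by omega : out.length - 1 < out.length)]
            intro hb
            rw [(endswith_bslash_iff out).mpr hb] at he'
            exact Bool.true_eq_false.mp he'
        · intro j hj hu
          exact h1 j ((uP_append_lt out _ j hj).mp hu)
      rw [hbf]
      dsimp only
      rw [List.take_left]

lemma splitOn_cons (x c : Char) (xs : List Char) :
    List.splitOn c (x :: xs) =
      if x = c then [] :: List.splitOn c xs else (List.splitOn c xs).modifyHead (x :: ·) := by
  simp [List.splitOn]

lemma splitOn_ne_nil (c : Char) (l : List Char) : List.splitOn c l ≠ [] := by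
  unfold List.splitOn
  exact List.splitOnP_ne_nil _ _

lemma splitOn_spec (l : List Char) :
    (∀ q ∈ List.splitOn '%' l, '%' ∉ q) ∧
    (List.splitOn '%' l).headD [] ++
      ((List.splitOn '%' l).tail).flatMap (fun q => '%' :: q) = l := by
  induction l with
  | nil => simp
  | cons c rest ih =>
    obtain ⟨ihm, ihr⟩ := ih
    cases hs : List.splitOn '%' rest with
    | nil => exact absurd hs (splitOn_ne_nil '%' rest)
    | cons p r =>
      rw [hs] at ihm ihr
      simp only [List.headD, List.tail] at ihr
      by_cases hc : c = '%'
      · rw [splitOn_cons, if_pos hc, hs]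
        constructor
        · intro q hq
          rcases List.mem_cons.mp hq with h | h
          · simp [h]
          · exact ihm q h
        · simp only [List.headD, List.tail, List.flatMap_cons, List.nil_append,
            List.cons_append]
          rw [ihr, hc]
      · rw [splitOn_cons, if_neg hc, hs]
        constructor
        · intro q hq
          simp only [List.modifyHead, List.mem_cons] at hq
          rcases hq with h | h
          · subst h
            intro hm
            rcases List.mem_cons.mp hm with h | h
            · exact hc h.symm
            · exact ihm p (by simp) h
          · exact ihm q (by simp [h])
        · simp only [List.modifyHead, List.headD, List.tail, List.cons_append]
          rw [ihr]

lemma cutComment_eq (l : List Char) :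
    cutComment l = (match bFind l none with
      | none => l
      | some k => PySem.Chars.rstrip (l.take k)) := by
  obtain ⟨hmem, hrec⟩ := splitOn_spec l
  rw [cutComment]
  cases hs : List.splitOn '%' l with
  | nil => exact absurd hs (splitOn_ne_nil '%' l)
  | cons p rest =>
    rw [hs] at hmem hrec
    simp only [List.headD, List.tail] at hrec
    dsimp only
    rw [cutLoop_eq rest p (noUnesc_of_not_mem p (hmem p (by simp)))
        (fun q hq => hmem q (by simp [hq])), hrec]

-- per-line: A's fold step appends exactly what bClean keeps
lemma step_eq (acc : List (List Char)) (ln : String) :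
    (let l := ln.toList
     let st := PySem.Chars.strip l
     if PySem.Chars.startswith st ['%'] && !PySem.Chars.startswith st ['%', '\\'] then acc
     else
       let l2 := if PySem.Chars.isIn ['%'] l && !PySem.Chars.startswith st ['%'] then
           aScan l 0 (l.length + 1)
         else l
       acc ++ [l2]) =
    acc ++ (match bClean ln with | none => [] | some v => [v]) := by
  dsimp only [bClean]
  by_cases h1 : PySem.Chars.startswith (PySem.Chars.strip ln.toList) ['%']
  · by_cases h2 : PySem.Chars.startswith (PySem.Chars.strip ln.toList) ['%', '\\']
    · simp [h1, h2]
    · simp [h1, h2]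
  · by_cases h3 : PySem.Chars.isIn ['%'] ln.toList
    · rw [aScan_eq ln.toList (ln.toList.length + 1) 0 (by omega) (by omega) (by omega)]
      rw [← cutComment_eq]
      simp [h1, h3]
    · have hb : bFind ln.toList none = none := by
        refine bFind_none _ _ (fun j hu => ?_)
        have hmem : '%' ∈ ln.toList := List.mem_of_getElem? hu.1
        rw [PySem.Chars.isIn_iff_infix, List.singleton_infix_iff] at h3
        exact h3 hmem
      have hcc : cutComment ln.toList = ln.toList := by
        rw [cutComment_eq, hb]
      simp [h1, h3, hcc]

lemma foldl_eq (lines : List String) : ∀ acc : List (List Char),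
    lines.foldl (fun acc ln =>
      let l := ln.toList
      let st := PySem.Chars.strip l
      if PySem.Chars.startswith st ['%'] && !PySem.Chars.startswith st ['%', '\\'] then acc
      else
        let l2 := if PySem.Chars.isIn ['%'] l && !PySem.Chars.startswith st ['%'] then
            aScan l 0 (l.length + 1)
          else l
        acc ++ [l2]) acc = acc ++ (lines.map bClean).filterMap id := by
  induction lines with
  | nil => simp
  | cons ln rest ih =>
    intro acc
    rw [List.foldl_cons, step_eq, ih]
    cases h : bClean ln <;> simp [h]

-- ===== VERDICT (by name: the statement is the Claim_ definition above) =====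
theorem strip_tex_comments_spec : Claim_equal_strip_tex_comments := by
  intro tex _
  unfold Spec_strip_tex_comments strip_tex_comments strip_tex_comments_alt
  dsimp only
  rw [foldl_eq]
  simp
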